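-- pv_equiv track=rewrite | github.com/MichaelRWolf/wolf-soho | Atlassian/linkedin_comment_parse.py | _segment_by_view_lines
-- ===== SOURCE A (Python) =====
-- from typing import Any, Dict, List, Optional
--
-- def _segment_by_view_lines(lines: List[str]) -> List[List[str]]:
--     """Split the full scrape into segments that start with 'View <Name>’s ... graphic link'."""
--     starts: List[int] = []
--     for i, l in enumerate(lines):
--         if l.startswith("View ") and "graphic link" in l:
--             starts.append(i)
--     starts.append(len(lines))
--
--     segs: List[List[str]] = []
--     for a, b in zip(starts, starts[1:]):
--         seg = lines[a:b]
--         if seg: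
--             segs.append(seg)
--     return segs
-- ===== SOURCE B (Python) =====
-- from typing import List
--
-- def _segment_by_view_lines(lines: List[str]) -> List[List[str]]:
--     """Single pass: grow the current segment, flushing it whenever a new 'View ... graphic link' line starts one."""
--     segs: List[List[str]] = []
--     current = None
--     for line in lines:
--         if line.startswith("View ") and "graphic link" in line:
--             if current is not None:
--                 segs.append(current)
--             current = [line]
--         elif current is not None:
--             current.append(line)
--     if current:
--         segs.append(current)
--     return segs
-- ===== Notes on version B (the rewrite author's own statement) =====
-- stated objective: alternative
-- what changed: Replaced the two-phase index-collection + zip/slicing approach with a single pass that builds segments incrementally in an optional current-segment accumulator.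
import Mathlib
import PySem

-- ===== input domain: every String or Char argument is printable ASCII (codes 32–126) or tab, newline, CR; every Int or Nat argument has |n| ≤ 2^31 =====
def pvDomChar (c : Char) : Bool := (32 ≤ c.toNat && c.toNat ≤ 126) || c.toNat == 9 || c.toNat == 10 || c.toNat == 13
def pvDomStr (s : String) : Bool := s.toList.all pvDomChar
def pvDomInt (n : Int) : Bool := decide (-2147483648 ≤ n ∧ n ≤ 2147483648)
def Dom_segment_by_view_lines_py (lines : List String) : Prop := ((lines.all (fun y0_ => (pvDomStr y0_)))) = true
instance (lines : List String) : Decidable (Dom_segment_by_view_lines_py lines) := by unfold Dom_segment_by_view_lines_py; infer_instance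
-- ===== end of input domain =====

-- B replaces A's index-collection + slicing with a single incremental pass building segments directly (objective: alternative).

-- the segment-start test 'l.startswith("View ") and "graphic link" in l', shared by both Pythons
def pvMatch (l : String) : Bool :=
  PySem.Str.startswith l "View " && PySem.Str.isIn "graphic link" l

-- ===== PORT A =====
def segment_by_view_lines_py (lines : List String) : List (List String) :=
  let starts : List Int :=
    (PySem.List.enumerate lines 0).foldl
      (fun acc p => if pvMatch p.2 then acc ++ [p.1] else acc) []
  let starts := starts ++ [PySem.List.len lines]
  (starts.zip (PySem.List.slice starts (some 1) none)).foldl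
    (fun segs ab =>
      let seg := PySem.List.slice lines (some ab.1) (some ab.2)
      if seg ≠ [] then segs ++ [seg] else segs) []

-- ===== PORT B =====
def segBStep (st : List (List String) × Option (List String)) (line : String) :
    List (List String) × Option (List String) :=
  if pvMatch line then
    (match st.2 with
     | some cur => st.1 ++ [cur]
     | none => st.1, some [line])
  else
    match st.2 with
    | some cur => (st.1, some (cur ++ [line]))
    | none => st

def segment_by_view_lines_py_alt (lines : List String) : List (List String) :=
  let st := lines.foldl segBStep ([], none)
  match st.2 with
  | some cur => if cur ≠ [] then st.1 ++ [cur] else st.1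
  | none => st.1

-- ===== PRECONDITION & SPEC =====
def Spec_segment_by_view_lines_py (lines : List String) (out : List (List String)) : Prop := out = segment_by_view_lines_py_alt lines
instance (lines : List String) (out : List (List String)) : Decidable (Spec_segment_by_view_lines_py lines out) := by unfold Spec_segment_by_view_lines_py; infer_instance

-- ===== CLAIM (what is proved, stated in full; the proofs are below) =====
def Claim_equal_segment_by_view_lines_py : Prop := ∀ (lines : List String), Dom_segment_by_view_lines_py lines → Spec_segment_by_view_lines_py lines (segment_by_view_lines_py lines)

-- ===== LEMMAS AND PROOFS =====

-- common reference: the segmentation, defined by structural recursion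
def specSeg : List String → List (List String)
  | [] => []
  | l :: ls =>
    if pvMatch l then (l :: ls.takeWhile (fun x => !pvMatch x)) :: specSeg ls
    else specSeg ls

-- proof-side views of A's two phases
def sOf (ls : List String) : List Int :=
  ((PySem.List.enumerate ls 0).filter (fun p => pvMatch p.2)).map (·.1)

def segFold (lines : List String) (init : List (List String)) (ps : List (Int × Int)) :
    List (List String) :=
  ps.foldl
    (fun segs ab =>
      let seg := PySem.List.slice lines (some ab.1) (some ab.2)
      if seg ≠ [] then segs ++ [seg] else segs) init

theorem A_eq_view (lines : List String) :
    segment_by_view_lines_py lines =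
      segFold lines []
        ((sOf lines ++ [(lines.length : Int)]).zip (sOf lines ++ [(lines.length : Int)]).tail) := by
  unfold segment_by_view_lines_py segFold sOf
  simp only [PySem.List.foldl_append_if, PySem.List.slice_from_one, PySem.List.len,
    List.nil_append]

theorem enumerate_shift {α : Type} (xs : List α) (s : Int) :
    PySem.List.enumerate xs (s + 1) =
      (PySem.List.enumerate xs s).map (fun p => (p.1 + 1, p.2)) := by
  induction xs generalizing s with
  | nil => simp [PySem.List.enumerate_nil]
  | cons x xs ih =>
    rw [PySem.List.enumerate_cons, PySem.List.enumerate_cons]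
    simp only [List.map_cons]
    rw [show s + 1 + 1 = (s + 1) + 1 by ring, ih]

theorem sOf_cons (l : String) (ls : List String) :
    sOf (l :: ls) = (if pvMatch l then [(0 : Int)] else []) ++ (sOf ls).map (· + 1) := by
  unfold sOf
  rw [PySem.List.enumerate_cons, show (0 : Int) + 1 = 0 + 1 by ring, enumerate_shift]
  by_cases h : pvMatch l <;> simp [h, List.filter_map, List.map_map, Function.comp_def]

theorem mem_sOf {x : Int} {ls : List String} (hx : x ∈ sOf ls) :
    ∃ k : Nat, x = (k : Int) ∧ k < ls.length := by
  unfold sOf at hx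
  simp only [List.mem_map, List.mem_filter] at hx
  obtain ⟨p, ⟨hp, _⟩, rfl⟩ := hx
  rw [PySem.List.mem_enumerate_iff] at hp
  obtain ⟨k, hk, rfl⟩ := hp
  exact ⟨k, by simp, hk⟩

theorem mem_T {x : Int} {ls : List String} (hx : x ∈ sOf ls ++ [(ls.length : Int)]) :
    ∃ k : Nat, x = (k : Int) ∧ k ≤ ls.length := by
  rcases List.mem_append.1 hx with h | h
  · obtain ⟨k, rfl, hk⟩ := mem_sOf h
    exact ⟨k, rfl, Nat.le_of_lt hk⟩
  · simp at h
    exact ⟨ls.length, by simp [h], le_rfl⟩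

theorem first_start (ls : List String) :
    (sOf ls ++ [(ls.length : Int)]).headI =
      ((ls.takeWhile (fun x => !pvMatch x)).length : Int) := by
  induction ls with
  | nil => simp [sOf, PySem.List.enumerate_nil]
  | cons l ls ih =>
    rw [sOf_cons]
    by_cases h : pvMatch l
    · simp [h]
    · have : ((if pvMatch l then [(0:Int)] else []) ++ (sOf ls).map (· + 1)) ++
          [((l :: ls).length : Int)] = ((sOf ls) ++ [(ls.length : Int)]).map (· + 1) := by
        simp [h]
      rw [this]
      have hne : sOf ls ++ [(ls.length : Int)] ≠ [] := by simp
      obtain ⟨t, T', hT⟩ := List.exists_cons_of_ne_nil hne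
      rw [hT] at ih ⊢
      simp only [List.map_cons, List.headI_cons] at ih ⊢
      rw [ih]
      simp only [List.takeWhile_cons, h, Bool.not_false, if_true, List.length_cons]
      push_cast; ring

theorem segFold_cons (lines : List String) (init : List (List String))
    (ab : Int × Int) (ps : List (Int × Int)) :
    segFold lines init (ab :: ps) =
      segFold lines
        (if PySem.List.slice lines (some ab.1) (some ab.2) ≠ [] then
          init ++ [PySem.List.slice lines (some ab.1) (some ab.2)]
        else init) ps := rfl

theorem segFold_init (lines : List String) (init : List (List String))
    (ps : List (Int × Int)) :
    segFold lines init ps = init ++ segFold lines [] ps := by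
  induction ps generalizing init with
  | nil => simp [segFold]
  | cons p ps ih =>
    rw [segFold_cons, segFold_cons]
    by_cases hc : PySem.List.slice lines (some p.1) (some p.2) ≠ []
    · rw [if_pos hc, if_pos hc, ih,
        ih ([] ++ [PySem.List.slice lines (some p.1) (some p.2)])]
      simp
    · rw [if_neg hc, if_neg hc, ih]

-- shifting all slice bounds by one steps over the head of the list
theorem slice_shift (l : String) (ls : List String) (j k : Nat) :
    PySem.List.slice (l :: ls) (some ((j : Int) + 1)) (some ((k : Int) + 1)) =
      PySem.List.slice ls (some (j : Int)) (some (k : Int)) := by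
  rw [show ((j : Int) + 1) = ((j + 1 : Nat) : Int) by push_cast; ring,
      show ((k : Int) + 1) = ((k + 1 : Nat) : Int) by push_cast; ring,
      PySem.List.slice_natCast, PySem.List.slice_natCast]
  simp [Nat.succ_sub_succ]

theorem segFold_shift (l : String) (ls : List String) (T : List Int)
    (hT : ∀ x ∈ T, ∃ k : Nat, x = (k : Int) ∧ k ≤ ls.length) :
    segFold (l :: ls) [] ((T.map (· + 1)).zip (T.map (· + 1)).tail) =
      segFold ls [] (T.zip T.tail) := by
  unfold segFold
  rw [← List.map_tail, List.zip_map, List.foldl_map]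
  apply PySem.List.foldl_congr_mem
  intro acc ab hab
  have h1 := List.of_mem_zip hab
  obtain ⟨j, hj, _⟩ := hT _ h1.1
  obtain ⟨k, hk, _⟩ := hT _ (List.mem_of_mem_tail h1.2)
  simp only [Prod.map, hj, hk]
  rw [slice_shift]

theorem take_takeWhile {α : Type} (p : α → Bool) (l : List α) :
    l.take (l.takeWhile p).length = l.takeWhile p :=
  (List.prefix_iff_eq_take.mp (List.takeWhile_prefix p)).symm

theorem A_view_eq_spec (lines : List String) :
    segFold lines []
      ((sOf lines ++ [(lines.length : Int)]).zip (sOf lines ++ [(lines.length : Int)]).tail) =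
      specSeg lines := by
  induction lines with
  | nil => simp [sOf, PySem.List.enumerate_nil, segFold, specSeg]
  | cons l ls ih =>
    have hne : sOf ls ++ [(ls.length : Int)] ≠ [] := by simp
    obtain ⟨t, T', hT⟩ := List.exists_cons_of_ne_nil hne
    have hmapT : ((sOf ls).map (· + 1)) ++ [((l :: ls).length : Int)] =
        (sOf ls ++ [(ls.length : Int)]).map (· + 1) := by
      simp
    by_cases h : pvMatch l
    · -- new segment starts at index 0
      rw [sOf_cons]
      simp only [h, if_true]
      have : (([(0:Int)] ++ (sOf ls).map (· + 1)) ++ [((l :: ls).length : Int)]) =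
          (0 : Int) :: (sOf ls ++ [(ls.length : Int)]).map (· + 1) := by
        rw [← hmapT]; simp
      rw [this, hT]
      simp only [List.map_cons, List.zip_cons_cons, List.tail_cons]
      have ht0 : t = ((ls.takeWhile (fun x => !pvMatch x)).length : Int) := by
        have := first_start ls; rw [hT] at this; simpa using this
      have hseg : PySem.List.slice (l :: ls) (some (0 : Int)) (some (t + 1)) =
          l :: ls.takeWhile (fun x => !pvMatch x) := by
        rw [ht0, show ((ls.takeWhile (fun x => !pvMatch x)).length : Int) + 1 =
            (((ls.takeWhile (fun x => !pvMatch x)).length + 1 : Nat) : Int) by push_cast; ring]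
        rw [show ((0:Int)) = ((0 : Nat) : Int) by simp, PySem.List.slice_natCast]
        simp [List.take_succ_cons, take_takeWhile]
      rw [segFold_cons]
      simp only [hseg]
      have hne2 : l :: ls.takeWhile (fun x => !pvMatch x) ≠ [] := by simp
      rw [if_pos hne2, List.nil_append]
      have hzip : ((t+1) :: T'.map (· + 1)).zip (T'.map (· + 1)) =
          ((t :: T').map (· + 1)).zip ((t :: T').map (· + 1)).tail := by simp
      rw [hzip, segFold_init, ← hT, segFold_shift l ls _ (fun x hx => mem_T hx), ih]
      simp [specSeg, h]
    · -- head line does not start a segment: same segmentation as the tail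
      rw [sOf_cons]
      simp only [h, if_false, Bool.false_eq_true, List.nil_append]
      rw [hmapT, segFold_shift l ls _ (fun x hx => mem_T hx), ih]
      simp [specSeg, h]

-- ===== B side =====
def goSeg (cur : List String) : List String → List (List String)
  | [] => [cur]
  | l :: ls => if pvMatch l then cur :: goSeg [l] ls else goSeg (cur ++ [l]) ls

def flushB (st : List (List String) × Option (List String)) : List (List String) :=
  match st.2 with
  | some cur => if cur ≠ [] then st.1 ++ [cur] else st.1
  | none => st.1

theorem goSeg_eq (ls : List String) : ∀ cur,
    goSeg cur ls = (cur ++ ls.takeWhile (fun x => !pvMatch x)) :: specSeg ls := by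
  induction ls with
  | nil => intro cur; simp [goSeg, specSeg]
  | cons l ls ih =>
    intro cur
    by_cases h : pvMatch l
    · simp [goSeg, h, specSeg, ih]
    · simp [goSeg, h, specSeg, ih]

theorem foldB_some (ls : List String) : ∀ segs cur, cur ≠ [] →
    flushB (ls.foldl segBStep (segs, some cur)) = segs ++ goSeg cur ls := by
  induction ls with
  | nil => intro segs cur hcur; simp [flushB, goSeg, hcur]
  | cons l ls ih =>
    intro segs cur hcur
    by_cases h : pvMatch l
    · simp only [List.foldl_cons, segBStep, h, if_true]
      rw [ih _ [l] (by simp)]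
      simp [goSeg, h]
    · simp only [List.foldl_cons, segBStep, h, Bool.false_eq_true, if_false]
      rw [ih _ (cur ++ [l]) (by simp)]
      simp [goSeg, h]

theorem foldB_none (ls : List String) : ∀ segs,
    flushB (ls.foldl segBStep (segs, none)) = segs ++ specSeg ls := by
  induction ls with
  | nil => intro segs; simp [flushB, specSeg]
  | cons l ls ih =>
    intro segs
    by_cases h : pvMatch l
    · simp only [List.foldl_cons, segBStep, h, if_true]
      rw [foldB_some _ _ [l] (by simp), goSeg_eq]
      simp [specSeg, h]
    · simp only [List.foldl_cons, segBStep, h, Bool.false_eq_true, if_false]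
      rw [ih]
      simp [specSeg, h]

theorem B_eq_spec (lines : List String) :
    segment_by_view_lines_py_alt lines = specSeg lines := by
  have := foldB_none lines []
  simpa [segment_by_view_lines_py_alt, flushB] using this

-- ===== VERDICT (by name: the statement is the Claim_ definition above) =====
theorem segment_by_view_lines_py_spec : Claim_equal_segment_by_view_lines_py := by
  intro lines _
  unfold Spec_segment_by_view_lines_py
  rw [A_eq_view, A_view_eq_spec, B_eq_spec]
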